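-- pv_equiv track=rewrite | github.com/Python-Elective/guess-my-word-game-Kanyanat-Grace | game_starter.py | get_available_letters
-- ===== SOURCE A (Python) =====
-- def get_available_letters(letters_guessed):
--     '''
--     letters_guessed: list, what letters have been guessed so far
--     returns: string, comprised of letters that represents what letters have not
--       yet been guessed.
--     '''
--
--     '''
--     convert lowercase alphabet from string to list
--       for every letter in letters_guessed
--         .remove the letters from the lowercase alphabet
--       return lowercase letters
--     '''
--
--     import string
--     lowercase = string.ascii_lowercase
--
--     for letters in letters_guessed:
--       if letters in lowercase:
--         lowercase = lowercase.replace(letters, '')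
--     return lowercase
-- ===== SOURCE B (Python) =====
-- def get_available_letters(letters_guessed):
--     import string
--     guessed = set(letters_guessed)
--     return ''.join(c for c in string.ascii_lowercase if c not in guessed)
-- ===== Notes on version B (the rewrite author's own statement) =====
-- stated objective: idiomatic
-- what changed: B loops once over the fixed 26-letter alphabet testing membership in a set built from letters_guessed, instead of A's loop over the guesses doing a substring test and str.replace on a shrinking alphabet string.
-- outside the precondition, e.g. on get_available_letters(['ab']): A returns 'cdefghijklmnopqrstuvwxyz', B returns 'abcdefghijklmnopqrstuvwxyz'
import Mathlib
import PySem

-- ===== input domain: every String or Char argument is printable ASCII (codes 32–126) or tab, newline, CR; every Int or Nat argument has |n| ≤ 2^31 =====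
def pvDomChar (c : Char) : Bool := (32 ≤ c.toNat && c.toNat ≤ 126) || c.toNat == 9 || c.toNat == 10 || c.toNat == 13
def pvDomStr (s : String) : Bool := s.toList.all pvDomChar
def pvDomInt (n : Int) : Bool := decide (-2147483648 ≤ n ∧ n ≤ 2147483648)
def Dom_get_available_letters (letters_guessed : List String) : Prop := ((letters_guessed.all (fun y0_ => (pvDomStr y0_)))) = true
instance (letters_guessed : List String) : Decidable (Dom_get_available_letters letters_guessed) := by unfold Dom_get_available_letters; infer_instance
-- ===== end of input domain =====

-- B iterates once over the fixed alphabet testing membership in a set of the guesses,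
-- instead of A's repeated substring-replace on a shrinking alphabet string (objective: idiomatic).

-- ===== PORT A =====
def get_available_letters (letters_guessed : List String) : String :=
  letters_guessed.foldl
    (fun lowercase letters =>
      if PySem.Str.isIn letters lowercase then PySem.Str.replace lowercase letters "" else lowercase)
    "abcdefghijklmnopqrstuvwxyz"

-- ===== PORT B =====
def get_available_letters_alt (letters_guessed : List String) : String :=
  let guessed := PySem.Set.ofList letters_guessed
  String.ofList (("abcdefghijklmnopqrstuvwxyz".toList).filter
    (fun c => ¬ PySem.Set.contains guessed (String.ofList [c])))

-- ===== PRECONDITION & SPEC =====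
-- Pre_ excludes lists containing a multi-character string that is a strictly increasing run of
-- lowercase letters: only such strings can ever be a substring of the remaining alphabet, and
-- A's str.replace may then delete the whole run (depending on earlier guesses) — an artefact of
-- implementing removal with substring replace; all other strings are kept inside Pre_.
def Pre_get_available_letters (letters_guessed : List String) : Prop :=
  ∀ s ∈ letters_guessed, s.toList.length ≤ 1 ∨
    ¬ (s.toList.Pairwise (· < ·) ∧ ∀ c ∈ s.toList, 'a' ≤ c ∧ c ≤ 'z')
instance (letters_guessed : List String) : Decidable (Pre_get_available_letters letters_guessed) := by unfold Pre_get_available_letters; infer_instance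

def pvWitness_get_available_letters : List String := ["a", "z", "a", "B", ""]

def Spec_get_available_letters (letters_guessed : List String) (out : String) : Prop := out = get_available_letters_alt letters_guessed
instance (letters_guessed : List String) (out : String) : Decidable (Spec_get_available_letters letters_guessed out) := by unfold Spec_get_available_letters; infer_instance

-- ===== CLAIM (what is proved, stated in full; the proofs are below) =====
def Claim_equal_get_available_letters : Prop := ∀ (letters_guessed : List String), Dom_get_available_letters letters_guessed → Pre_get_available_letters letters_guessed → Spec_get_available_letters letters_guessed (get_available_letters letters_guessed)

-- ===== LEMMAS AND PROOFS =====

-- the starting alphabet is strictly increasing and all lowercase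
set_option maxRecDepth 100000 in
lemma alphabet_pairwise : "abcdefghijklmnopqrstuvwxyz".toList.Pairwise (· < ·) := by decide

set_option maxRecDepth 100000 in
lemma alphabet_all_lower :
    ("abcdefghijklmnopqrstuvwxyz".toList.all (fun c => 'a' ≤ c && c ≤ 'z')) = true := by decide

lemma alphabet_lower : ∀ c ∈ "abcdefghijklmnopqrstuvwxyz".toList, 'a' ≤ c ∧ c ≤ 'z' := by
  intro c hc
  have := List.all_eq_true.mp alphabet_all_lower c hc
  simpa using this

-- replace.go with a single-char pattern and empty replacement filters that char out
lemma replace_go_singleton (c : Char) : ∀ (fuel : Nat) (l acc : List Char), l.length ≤ fuel →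
    PySem.Chars.replace.go [c] [] fuel l acc = acc.reverse ++ l.filter (· ≠ c) := by
  intro fuel
  induction fuel with
  | zero =>
    intro l acc h
    have : l = [] := List.length_eq_zero_iff.mp (Nat.le_zero.mp h)
    subst this; simp [PySem.Chars.replace.go]
  | succ n ih =>
    intro l acc h
    cases l with
    | nil => simp [PySem.Chars.replace.go]
    | cons d t =>
      simp only [PySem.Chars.replace.go]
      by_cases hd : c = d
      · subst hd
        simp only [List.isPrefixOf, BEq.rfl, Bool.true_and, if_true]
        rw [show List.length [c] = 1 from rfl, List.drop_one, List.tail_cons,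
          show List.reverse ([] : List Char) ++ acc = acc from by simp]
        rw [ih t acc (by simpa using Nat.le_of_succ_le_succ h)]
        simp
      · have hpre : ([c].isPrefixOf (d :: t)) = false := by
          simp [List.isPrefixOf]; exact hd
        rw [hpre]
        simp only [Bool.false_eq_true, if_false]
        rw [ih t (d :: acc) (by simpa using Nat.le_of_succ_le_succ h)]
        simp [Ne.symm hd]

lemma replace_singleton (l : List Char) (c : Char) :
    PySem.Chars.replace l [c] [] = l.filter (· ≠ c) := by
  rw [PySem.Chars.replace]
  simp only [List.isEmpty_cons, Bool.false_eq_true, if_false]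
  exact replace_go_singleton c l.length l [] le_rfl

-- one step of A's loop, on a guess Pre_ admits, filters that guess's character out
-- (the state is always a strictly increasing list of lowercase letters, so a multi-char
-- guess admitted by Pre_ is never a substring of it and the step is the identity)
lemma stepA_toList (s g : String)
    (hs : s.toList.Pairwise (· < ·)) (hsl : ∀ c ∈ s.toList, 'a' ≤ c ∧ c ≤ 'z')
    (hg : g.toList.length ≤ 1 ∨
      ¬ (g.toList.Pairwise (· < ·) ∧ ∀ c ∈ g.toList, 'a' ≤ c ∧ c ≤ 'z')) :
    (if PySem.Str.isIn g s then PySem.Str.replace s g "" else s).toList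
      = s.toList.filter (fun c => ¬ (String.ofList [c] = g)) := by
  by_cases hlen : g.toList.length ≤ 1
  · match hgl : g.toList with
    | [] =>
      have hin : PySem.Str.isIn g s = true := by
        rw [PySem.Str.isIn_iff_infix, hgl]; simp
      rw [hin]
      simp only [if_true]
      rw [PySem.Str.toList_replace, hgl]
      show PySem.Chars.replace s.toList [] "".toList = _
      rw [show ("" : String).toList = [] from rfl, PySem.Chars.replace]
      have hne : ∀ c : Char, ¬ (String.ofList [c] = g) := by
        intro c h
        have := congrArg String.toList h
        rw [String.toList_ofList, hgl] at this
        exact List.cons_ne_nil c [] this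
      simp only [List.isEmpty_nil, if_true]
      rw [List.filter_eq_self.mpr (by intro a _; simpa using hne a)]
      simp only [List.flatMap]
      induction s.toList with
      | nil => simp
      | cons x xs ihx => simpa using ihx
    | [c] =>
      have heq : ∀ a : Char, (String.ofList [a] = g) ↔ a = c := by
        intro a
        constructor
        · intro h
          have := congrArg String.toList h
          rw [String.toList_ofList, hgl] at this
          exact List.singleton_injective this
        · intro h
          subst h
          rw [← hgl, String.ofList_toList]
      by_cases hin : PySem.Str.isIn g s = true
      · rw [hin]
        simp only [if_true]
        rw [PySem.Str.toList_replace, hgl]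
        show PySem.Chars.replace s.toList [c] "".toList = _
        rw [show ("" : String).toList = [] from rfl, replace_singleton]
        apply List.filter_congr
        intro a _
        simp [heq a]
      · rw [Bool.not_eq_true] at hin
        rw [hin]
        simp only [Bool.false_eq_true, if_false]
        have hnotin : c ∉ s.toList := by
          intro hmem
          have : PySem.Str.isIn g s = true := by
            rw [PySem.Str.isIn_iff_infix, hgl]
            obtain ⟨s1, s2, hsp⟩ := List.append_of_mem hmem
            exact ⟨s1, s2, by rw [hsp]; simp⟩
          rw [hin] at this; exact Bool.false_ne_true this
        symm
        apply List.filter_eq_self.mpr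
        intro a ha
        simp only [decide_not, Bool.not_eq_eq_eq_not, Bool.not_true, decide_eq_false_iff_not]
        rw [heq a]
        intro h; subst h; exact hnotin ha
    | c :: d :: t =>
      exfalso
      rw [hgl] at hlen
      simp at hlen
  · -- g has ≥ 2 characters; Pre_ says it is not an increasing lowercase run,
    -- so it is never a substring of the increasing lowercase state s
    have hbad : ¬ (g.toList.Pairwise (· < ·) ∧ ∀ c ∈ g.toList, 'a' ≤ c ∧ c ≤ 'z') :=
      hg.resolve_left hlen
    have hin : PySem.Str.isIn g s = false := by
      rw [Bool.eq_false_iff]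
      intro habs
      rw [PySem.Str.isIn_iff_infix] at habs
      exact hbad ⟨hs.sublist habs.sublist,
        fun c hc => hsl c (habs.subset hc)⟩
    rw [hin]
    simp only [Bool.false_eq_true, if_false]
    symm
    apply List.filter_eq_self.mpr
    intro a _
    simp only [decide_not, Bool.not_eq_eq_eq_not, Bool.not_true, decide_eq_false_iff_not]
    intro h
    have := congrArg (fun t => t.toList.length) h
    simp only [String.toList_ofList, List.length_cons, List.length_nil] at this
    omega

-- A's whole fold, from any increasing lowercase start string, filters out the guessed letters
lemma foldA_toList (gs : List String)
    (hgs : ∀ s ∈ gs, s.toList.length ≤ 1 ∨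
      ¬ (s.toList.Pairwise (· < ·) ∧ ∀ c ∈ s.toList, 'a' ≤ c ∧ c ≤ 'z')) :
    ∀ (s : String), s.toList.Pairwise (· < ·) → (∀ c ∈ s.toList, 'a' ≤ c ∧ c ≤ 'z') →
    (gs.foldl (fun lowercase letters =>
        if PySem.Str.isIn letters lowercase then PySem.Str.replace lowercase letters "" else lowercase) s).toList
      = s.toList.filter (fun c => ¬ (String.ofList [c] ∈ gs)) := by
  induction gs with
  | nil => intro s _ _; simp
  | cons g rest ih =>
    intro s hs hsl
    rw [List.foldl_cons]
    have hstep := stepA_toList s g hs hsl (hgs g (List.mem_cons_self))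
    have hstep' :
        (if PySem.Str.isIn g s then PySem.Str.replace s g "" else s).toList.Pairwise (· < ·) := by
      rw [hstep]; exact hs.sublist List.filter_sublist
    have hstepl :
        ∀ c ∈ (if PySem.Str.isIn g s then PySem.Str.replace s g "" else s).toList,
          'a' ≤ c ∧ c ≤ 'z' := by
      intro c hc
      rw [hstep] at hc
      exact hsl c (List.filter_sublist.subset hc)
    rw [ih (fun x hx => hgs x (List.mem_cons_of_mem g hx)) _ hstep' hstepl]
    rw [hstep, List.filter_filter]
    apply List.filter_congr
    intro a _
    simp only [List.mem_cons, decide_not]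
    rw [Bool.and_comm]
    simp

theorem get_available_letters_spec : Claim_equal_get_available_letters := by
  intro gs _ hpre
  unfold Spec_get_available_letters get_available_letters get_available_letters_alt
  apply String.toList_inj.mp
  rw [foldA_toList gs hpre _ alphabet_pairwise alphabet_lower]
  simp only [String.toList_ofList]
  apply List.filter_congr
  intro a _
  simp [PySem.Set.mem_ofList]
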